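-- pv_equiv track=rewrite | github.com/arthurpcidrao/Python | fundamentals/Truth table.py | qtd_variables
-- ===== SOURCE A (Python) =====
-- alphabet = "abcdefghijklmnopqrstuwxyzABCDEFGHIJKLMNOPQRSTUWXYZ"
--
-- def qtd_variables(equation):
--     '''
--     Função usada para contar quantas variáveis (letras) há na equação\nEntrada: String\nSaída: Int
--     '''
--     variables = []
--
--     for logic in (equation):
--         for letter in (alphabet):
--             if (logic == letter):
--                 variables.append(logic)
--
--     vetor_sem_duplicatas = list(set(variables))  # remove duplicatas
--     vetor_sem_duplicatas.sort() # ordena as variáveis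
--
--     return vetor_sem_duplicatas
-- ===== SOURCE B (Python) =====
-- alphabet = "abcdefghijklmnopqrstuwxyzABCDEFGHIJKLMNOPQRSTUWXYZ"
--
-- def qtd_variables(equation):
--     present = set(equation)
--     return sorted(letter for letter in alphabet if letter in present)
-- ===== Notes on version B (the rewrite author's own statement) =====
-- stated objective: faster
-- what changed: B builds the set of the equation's characters once and drives the loop over the fixed alphabet constant, keeping letters present in that set, instead of A's nested scan of every equation character against every alphabet letter followed by an explicit set dedup; no dedup step is needed since the alphabet has distinct letters.
import Mathlib
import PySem

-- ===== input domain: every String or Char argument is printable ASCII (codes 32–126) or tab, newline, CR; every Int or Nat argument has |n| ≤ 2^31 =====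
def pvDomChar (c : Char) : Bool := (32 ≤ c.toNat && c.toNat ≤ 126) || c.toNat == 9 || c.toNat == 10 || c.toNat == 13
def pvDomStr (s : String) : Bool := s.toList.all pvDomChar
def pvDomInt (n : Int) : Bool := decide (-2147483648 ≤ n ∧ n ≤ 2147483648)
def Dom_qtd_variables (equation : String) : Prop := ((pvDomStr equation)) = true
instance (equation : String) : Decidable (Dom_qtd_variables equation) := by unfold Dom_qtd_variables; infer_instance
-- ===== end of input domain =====

-- B drives the loop over the fixed alphabet constant, testing membership in the equation's
-- character set, instead of A's nested scan plus explicit set dedup (objective: faster — one pass over the equation instead of a nested scan).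


-- the module constant (note: the original string is missing 'v' and 'V')
def pvAlphabet : String := "abcdefghijklmnopqrstuwxyzABCDEFGHIJKLMNOPQRSTUWXYZ"

-- ===== PORT A =====
-- nested loops collecting matching one-char strings; list(set(..)) = PySem.Set.ofList; .sort() = sorted id
def qtd_variables (equation : String) : List String :=
  let collected : List String :=
    equation.toList.foldl (fun acc logic =>
      pvAlphabet.toList.foldl (fun acc2 letter =>
        if logic == letter then acc2 ++ [String.ofList [logic]] else acc2) acc) []
  PySem.List.sorted (PySem.Set.ofList collected) (fun x => x) false

-- ===== PORT B =====
-- 'letter in present' on a one-character string is exactly char membership in the set of equation's chars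
def qtd_variables_alt (equation : String) : List String :=
  let present : PySem.Set Char := PySem.Set.ofList equation.toList
  PySem.List.sorted
    ((pvAlphabet.toList.filter (fun letter => PySem.Set.contains present letter)).map
      (fun letter => String.ofList [letter])) (fun x => x) false

-- ===== PRECONDITION & SPEC =====
def Spec_qtd_variables (equation : String) (out : List String) : Prop := out = qtd_variables_alt equation
instance (equation : String) (out : List String) : Decidable (Spec_qtd_variables equation out) := by unfold Spec_qtd_variables; infer_instance

-- ===== CLAIM (what is proved, stated in full; the proofs are below) =====
def Claim_equal_qtd_variables : Prop := ∀ (equation : String), Dom_qtd_variables equation → Spec_qtd_variables equation (qtd_variables equation)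

-- ===== LEMMAS AND PROOFS =====

theorem pv_vars_eq (l : List Char) (acc : List String) :
    l.foldl (fun acc logic =>
      pvAlphabet.toList.foldl (fun acc2 letter =>
        if logic == letter then acc2 ++ [String.ofList [logic]] else acc2) acc) acc
    = acc ++ l.flatMap (fun logic =>
        (pvAlphabet.toList.filter (fun letter => logic == letter)).map
          (fun _ => String.ofList [logic])) := by
  induction l generalizing acc with
  | nil => simp
  | cons c t ih =>
    simp only [List.foldl_cons, List.flatMap_cons, ih,
      PySem.List.foldl_append_if (fun letter => c == letter) (fun _ => String.ofList [c])]
    simp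

theorem pv_ofList_inj : Function.Injective (fun c : Char => String.ofList [c]) := by
  intro a b h
  have := congrArg String.toList h
  simpa using this

theorem pv_mem_A (equation : String) (x : String) :
    (x ∈ PySem.Set.ofList (equation.toList.foldl (fun acc logic =>
      pvAlphabet.toList.foldl (fun acc2 letter =>
        if logic == letter then acc2 ++ [String.ofList [logic]] else acc2) acc) []))
    ↔ ∃ c, c ∈ pvAlphabet.toList ∧ c ∈ equation.toList ∧ x = String.ofList [c] := by
  rw [PySem.Set.mem_ofList, pv_vars_eq]
  simp only [List.nil_append, List.mem_flatMap, List.mem_map, List.mem_filter, beq_iff_eq]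
  constructor
  · rintro ⟨c, hc, letter, ⟨hla, rfl⟩, rfl⟩
    exact ⟨c, hla, hc, rfl⟩
  · rintro ⟨c, hla, hc, rfl⟩
    exact ⟨c, hc, c, ⟨hla, rfl⟩, rfl⟩

theorem pv_mem_B (equation : String) (x : String) :
    (x ∈ (pvAlphabet.toList.filter (fun letter =>
        PySem.Set.contains (PySem.Set.ofList equation.toList) letter)).map
      (fun letter => String.ofList [letter]))
    ↔ ∃ c, c ∈ pvAlphabet.toList ∧ c ∈ equation.toList ∧ x = String.ofList [c] := by
  simp only [List.mem_map, List.mem_filter, PySem.Set.contains,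
    List.contains_iff_mem, PySem.Set.mem_ofList]
  constructor
  · rintro ⟨c, ⟨hla, hc⟩, rfl⟩; exact ⟨c, hla, hc, rfl⟩
  · rintro ⟨c, hla, hc, rfl⟩; exact ⟨c, ⟨hla, hc⟩, rfl⟩

theorem pv_nodup_B (equation : String) :
    ((pvAlphabet.toList.filter (fun letter =>
        PySem.Set.contains (PySem.Set.ofList equation.toList) letter)).map
      (fun letter => String.ofList [letter])).Nodup := by
  apply List.Nodup.map pv_ofList_inj
  apply List.Nodup.filter
  decide

-- ===== VERDICT (by name: the statement is the Claim_ definition above) =====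
theorem qtd_variables_spec : Claim_equal_qtd_variables := by
  intro equation _
  unfold Spec_qtd_variables qtd_variables qtd_variables_alt
  apply PySem.List.sorted_eq_sorted_of_perm _ _ _ (fun a b h => h)
  rw [List.perm_ext_iff_of_nodup (PySem.Set.nodup_ofList _) (pv_nodup_B equation)]
  intro x
  rw [pv_mem_A, pv_mem_B]
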